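-- pv_equiv track=rewrite | github.com/azton/SynthReasoner | llm_verifiable_code.py | _heuristic_code_extraction
-- ===== SOURCE A (Python) =====
-- def _heuristic_code_extraction(response: str, language: str) -> str:
--     """Heuristically extract code based on language patterns"""
--     lines = response.split('\n')
--     code_lines = []
--     in_code = False
--
--     if language == "python":
--         for line in lines:
--             if line.strip().startswith('def ') or line.strip().startswith('import ') or line.strip().startswith('if __name__'):
--                 in_code = True
--             if in_code:
--                 code_lines.append(line)
--     elif language == "cpp":
--         for line in lines:
--             if line.strip().startswith('#include') or line.strip().startswith('using namespace') or 'int main(' in line: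
--                 in_code = True
--             if in_code:
--                 code_lines.append(line)
--     elif language == "fortran":
--         for line in lines:
--             if line.strip().lower().startswith('program ') or line.strip().lower().startswith('subroutine '):
--                 in_code = True
--             if in_code:
--                 code_lines.append(line)
--
--     return '\n'.join(code_lines)
-- ===== SOURCE B (Python) =====
-- def _is_python_start(line):
--     s = line.strip()
--     return s.startswith('def ') or s.startswith('import ') or s.startswith('if __name__')
--
--
-- def _is_cpp_start(line):
--     s = line.strip()
--     return s.startswith('#include') or s.startswith('using namespace') or 'int main(' in line
--
--
-- def _is_fortran_start(line):
--     s = line.strip().lower()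
--     return s.startswith('program ') or s.startswith('subroutine ')
--
--
-- def _get_start_predicate(language):
--     if language == "python":
--         return _is_python_start
--     if language == "cpp":
--         return _is_cpp_start
--     if language == "fortran":
--         return _is_fortran_start
--     return None
--
--
-- def _heuristic_code_extraction(response: str, language: str) -> str:
--     """Heuristically extract code based on language patterns"""
--     pred = _get_start_predicate(language)
--     if pred is None:
--         return ''
--     lines = response.split('\n')
--     i = next((k for k, line in enumerate(lines) if pred(line)), None)
--     if i is None:
--         return ''
--     return '\n'.join(lines[i:])
-- ===== Notes on version B (the rewrite author's own statement) =====
-- stated objective: simpler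
-- what changed: Replaces the three duplicated flag-carrying append loops by per-language start predicates plus locate-the-first-matching-line-then-slice ('\n'.join(lines[i:])), since once in_code flips every remaining line is kept verbatim.
import Mathlib
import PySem

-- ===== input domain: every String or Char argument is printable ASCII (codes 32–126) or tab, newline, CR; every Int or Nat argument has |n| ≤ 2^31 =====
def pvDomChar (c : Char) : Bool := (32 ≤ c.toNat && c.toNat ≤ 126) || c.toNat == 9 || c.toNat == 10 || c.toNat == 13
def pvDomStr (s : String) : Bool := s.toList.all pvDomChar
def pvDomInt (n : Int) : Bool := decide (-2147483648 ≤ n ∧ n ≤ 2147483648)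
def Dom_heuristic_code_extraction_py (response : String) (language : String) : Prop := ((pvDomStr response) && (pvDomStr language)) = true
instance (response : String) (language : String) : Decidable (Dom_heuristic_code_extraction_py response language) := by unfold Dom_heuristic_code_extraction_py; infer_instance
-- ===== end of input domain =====

-- Header: B replaces A's three flag-carrying append loops by per-language start
-- predicates plus find-first-matching-line-then-slice; objective: simpler.

-- ===== PORT A =====
-- the in_code/code_lines loop shared by A's three branches, parameterized by the
-- inline line condition of each branch (each Python loop is exactly this recursion)
def pvFlagLoop (cond : String → Bool) : List String → List String × Bool → List String × Bool
  | [], st => st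
  | line :: rest, (code_lines, in_code) =>
      let in_code' := in_code || cond line
      pvFlagLoop cond rest ((if in_code' then code_lines ++ [line] else code_lines), in_code')

def heuristic_code_extraction_py (response : String) (language : String) : String :=
  -- response.split('\n'): sep is the nonempty "\n", so split? is always some
  let lines := (PySem.Str.split? response "\n").getD []
  let code_lines : List String :=
    if language == "python" then
      (pvFlagLoop (fun line =>
        PySem.Str.startswith (PySem.Str.strip line) "def " ||
        PySem.Str.startswith (PySem.Str.strip line) "import " ||
        PySem.Str.startswith (PySem.Str.strip line) "if __name__") lines ([], false)).1
    else if language == "cpp" then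
      (pvFlagLoop (fun line =>
        PySem.Str.startswith (PySem.Str.strip line) "#include" ||
        PySem.Str.startswith (PySem.Str.strip line) "using namespace" ||
        PySem.Str.isIn "int main(" line) lines ([], false)).1
    else if language == "fortran" then
      (pvFlagLoop (fun line =>
        PySem.Str.startswith (PySem.Str.lower (PySem.Str.strip line)) "program " ||
        PySem.Str.startswith (PySem.Str.lower (PySem.Str.strip line)) "subroutine ") lines ([], false)).1
    else []
  PySem.Str.join "\n" code_lines

-- ===== PORT B =====
def pvIsPythonStart (line : String) : Bool :=
  let s := PySem.Str.strip line
  PySem.Str.startswith s "def " || PySem.Str.startswith s "import " ||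
    PySem.Str.startswith s "if __name__"

def pvIsCppStart (line : String) : Bool :=
  let s := PySem.Str.strip line
  PySem.Str.startswith s "#include" || PySem.Str.startswith s "using namespace" ||
    PySem.Str.isIn "int main(" line

def pvIsFortranStart (line : String) : Bool :=
  let s := PySem.Str.lower (PySem.Str.strip line)
  PySem.Str.startswith s "program " || PySem.Str.startswith s "subroutine "

-- _get_start_predicate(language)
def pvStartPred? (language : String) : Option (String → Bool) :=
  if language == "python" then some pvIsPythonStart
  else if language == "cpp" then some pvIsCppStart
  else if language == "fortran" then some pvIsFortranStart
  else none

def heuristic_code_extraction_py_alt (response : String) (language : String) : String :=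
  match pvStartPred? language with
  | none => ""
  | some pred =>
    let lines := (PySem.Str.split? response "\n").getD []
    match lines.findIdx? pred with
    | none => ""
    | some i => PySem.Str.join "\n" (lines.drop i)

-- ===== PRECONDITION & SPEC =====
def Spec_heuristic_code_extraction_py (response : String) (language : String) (out : String) : Prop := out = heuristic_code_extraction_py_alt response language
instance (response : String) (language : String) (out : String) : Decidable (Spec_heuristic_code_extraction_py response language out) := by unfold Spec_heuristic_code_extraction_py; infer_instance

-- ===== CLAIM (what is proved, stated in full; the proofs are below) =====
def Claim_equal_heuristic_code_extraction_py : Prop := ∀ (response : String) (language : String), Dom_heuristic_code_extraction_py response language → Spec_heuristic_code_extraction_py response language (heuristic_code_extraction_py response language)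

-- ===== LEMMAS AND PROOFS =====

-- once the flag is set every remaining line is appended
theorem pvFlagLoop_true (cond : String → Bool) (ls : List String) (acc : List String) :
    (pvFlagLoop cond ls (acc, true)).1 = acc ++ ls := by
  induction ls generalizing acc with
  | nil => simp [pvFlagLoop]
  | cons l rest ih => simp [pvFlagLoop, ih]

-- with the flag unset the loop keeps exactly the suffix from the first matching line
theorem pvFlagLoop_false (cond : String → Bool) (ls : List String) (acc : List String) :
    (pvFlagLoop cond ls (acc, false)).1 =
      acc ++ (match ls.findIdx? cond with
              | none => []
              | some i => ls.drop i) := by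
  induction ls generalizing acc with
  | nil => simp [pvFlagLoop]
  | cons l rest ih =>
    by_cases h : cond l
    · simp [pvFlagLoop, h, List.findIdx?_cons, pvFlagLoop_true]
    · simp only [pvFlagLoop, h, Bool.false_or, if_neg (Bool.false_ne_true), ih,
        List.findIdx?_cons, Option.map]
      cases rest.findIdx? cond <;> simp

theorem pvBranch_eq (cond : String → Bool) (lines : List String) :
    PySem.Str.join "\n" ((pvFlagLoop cond lines ([], false)).1) =
      (match lines.findIdx? cond with
       | none => ""
       | some i => PySem.Str.join "\n" (lines.drop i)) := by
  rw [pvFlagLoop_false]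
  cases lines.findIdx? cond <;> rfl

-- ===== VERDICT (by name: the statement is the Claim_ definition above) =====
theorem heuristic_code_extraction_py_spec : Claim_equal_heuristic_code_extraction_py := by
  intro response language _
  unfold Spec_heuristic_code_extraction_py heuristic_code_extraction_py
    heuristic_code_extraction_py_alt
  by_cases hp : language = "python"
  · subst hp
    rw [show pvStartPred? "python" = some pvIsPythonStart by simp [pvStartPred?]]
    simp only [beq_self_eq_true, if_true, pvBranch_eq]
    rfl
  · by_cases hc : language = "cpp"
    · subst hc
      rw [show pvStartPred? "cpp" = some pvIsCppStart by simp [pvStartPred?]]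
      simp only [show ("cpp" == "python") = false from rfl, beq_self_eq_true,
        Bool.false_eq_true, if_false, if_true, pvBranch_eq]
      rfl
    · by_cases hf : language = "fortran"
      · subst hf
        rw [show pvStartPred? "fortran" = some pvIsFortranStart by simp [pvStartPred?]]
        simp only [show ("fortran" == "python") = false from rfl,
          show ("fortran" == "cpp") = false from rfl, beq_self_eq_true,
          Bool.false_eq_true, if_false, if_true, pvBranch_eq]
        rfl
      · have hnone : pvStartPred? language = none := by
          simp [pvStartPred?, hp, hc, hf]
        rw [hnone]
        simp only [beq_iff_eq, hp, hc, hf, if_false]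
        rfl
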